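-- pv_equiv track=rewrite | github.com/phuongpq2510/phuongpq | pyGUI.py | getNameFileReduc
-- ===== SOURCE A (Python) =====
-- def getNameFileReduc(f0):
--     nmax = 23
--     if len(f0)<nmax:
--         return f0
--     #
--     f1= str(f0).replace("\\","/")
--     f1= f1.replace("\"","/")
--     #
--     idx= [pos for pos, char in enumerate(f1) if char == "/"]
--     for i in idx:
--         if len(f1)-i<nmax:
--             return ".."+f1[i:]
--     #
--     return f1
-- ===== SOURCE B (Python) =====
-- def getNameFileReduc(f0):
--     nmax = 23
--     if len(f0) < nmax:
--         return f0
--     f1 = f0.replace("\\", "/").replace("\"", "/")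
--     idx = f1.find("/", len(f1) - nmax + 1)
--     if idx == -1:
--         return f1
--     return ".." + f1[idx:]
-- ===== Notes on version B (the rewrite author's own statement) =====
-- stated objective: faster
-- what changed: Instead of building the list of all slash positions with enumerate and scanning it against len(f1)-i<23, B computes the threshold start len(f1)-nmax+1 and locates the truncation point with a single str.find call.
import Mathlib
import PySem

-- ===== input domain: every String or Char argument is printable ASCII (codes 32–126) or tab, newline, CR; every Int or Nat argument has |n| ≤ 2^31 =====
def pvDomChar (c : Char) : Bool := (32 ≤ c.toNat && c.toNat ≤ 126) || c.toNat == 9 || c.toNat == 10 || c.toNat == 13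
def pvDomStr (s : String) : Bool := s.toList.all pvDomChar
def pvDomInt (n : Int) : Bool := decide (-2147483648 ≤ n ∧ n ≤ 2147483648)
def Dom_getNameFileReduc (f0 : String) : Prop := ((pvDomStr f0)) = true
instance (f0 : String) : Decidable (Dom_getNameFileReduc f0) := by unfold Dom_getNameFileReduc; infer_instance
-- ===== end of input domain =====

-- B replaces A's list of all slash positions and its scanning loop by a single
-- str.find from the threshold start index (same O(n) asymptotics, measured faster by a constant factor).

-- ===== PORT A =====
-- the 'for i in idx: if len(f1)-i<23: return ".."+f1[i:]' loop
def pvLoopA (f1 : List Char) : List Int → String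
  | [] => String.ofList f1
  | i :: rest =>
    if (f1.length : Int) - i < 23 then
      String.ofList ('.' :: '.' :: PySem.List.slice f1 (some i) none)
    else pvLoopA f1 rest

def getNameFileReduc (f0 : String) : String :=
  if (f0.toList.length : Int) < 23 then f0
  else
    let f1 := PySem.Chars.replace f0.toList ['\\'] ['/']
    let f1 := PySem.Chars.replace f1 ['"'] ['/']
    let idx := ((PySem.List.enumerate f1).filter (fun p => p.2 == '/')).map (·.1)
    pvLoopA f1 idx

-- ===== PORT B =====
def getNameFileReduc_alt (f0 : String) : String :=
  if (f0.toList.length : Int) < 23 then f0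
  else
    let f1 := PySem.Chars.replace (PySem.Chars.replace f0.toList ['\\'] ['/']) ['"'] ['/']
    let idx := PySem.Chars.findFrom f1 ['/'] ((f1.length : Int) - 23 + 1)
    if idx == -1 then String.ofList f1
    else String.ofList ('.' :: '.' :: PySem.List.slice f1 (some idx) none)

-- ===== PRECONDITION & SPEC =====
def Spec_getNameFileReduc (f0 : String) (out : String) : Prop := out = getNameFileReduc_alt f0
instance (f0 : String) (out : String) : Decidable (Spec_getNameFileReduc f0 out) := by unfold Spec_getNameFileReduc; infer_instance

-- ===== CLAIM (what is proved, stated in full; the proofs are below) =====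
def Claim_equal_getNameFileReduc : Prop := ∀ (f0 : String), Dom_getNameFileReduc f0 → Spec_getNameFileReduc f0 (getNameFileReduc f0)

-- ===== LEMMAS AND PROOFS =====

-- single-char replace is a map
theorem pv_go_single (a b : Char) :
    ∀ (fuel : Nat) (l acc : List Char), l.length ≤ fuel →
      PySem.Chars.replace.go [a] [b] fuel l acc
        = acc.reverse ++ l.map (fun c => if c = a then b else c) := by
  intro fuel
  induction fuel with
  | zero =>
    intro l acc h
    have : l = [] := List.eq_nil_of_length_eq_zero (Nat.le_zero.mp h)
    subst this
    simp [PySem.Chars.replace.go]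
  | succ n ih =>
    intro l acc h
    cases l with
    | nil => simp [PySem.Chars.replace.go]
    | cons c t =>
      by_cases hc : c = a
      · subst hc
        rw [PySem.Chars.replace.go]
        simp_all [ih t (b :: acc) (by simpa using Nat.lt_succ_iff.mp h)]
      · have : [a].isPrefixOf (c :: t) = false := by simp [List.isPrefixOf]; exact fun h' => hc h'.symm
        rw [PySem.Chars.replace.go]
        simp_all [ih t (c :: acc) (by simpa using Nat.lt_succ_iff.mp h)]

theorem pv_replace_single (s : List Char) (a b : Char) :
    PySem.Chars.replace s [a] [b] = s.map (fun c => if c = a then b else c) := by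
  rw [PySem.Chars.replace]
  simp [pv_go_single a b s.length s [] le_rfl]

-- the loop skips a prefix of indices on which the test fails
theorem pvLoopA_append_fail (f1 : List Char) (xs ys : List Int)
    (h : ∀ i ∈ xs, ¬ ((f1.length : Int) - i < 23)) :
    pvLoopA f1 (xs ++ ys) = pvLoopA f1 ys := by
  induction xs with
  | nil => rfl
  | cons x xs ih =>
    simp only [List.cons_append, pvLoopA]
    rw [if_neg (h x (by simp))]
    exact ih (fun i hi => h i (by simp [hi]))

-- past the threshold the loop fires at the first slash
theorem pvLoopA_tail (f1 : List Char) (k : Nat) (hk : (f1.length : Int) - (k : Int) < 23) :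
    ∀ (l : List Char) (s : Nat), (k : Int) ≤ (s : Int) →
      pvLoopA f1 (((PySem.List.enumerate l (s : Int)).filter (fun p => p.2 == '/')).map (·.1))
        = if '/' ∈ l then
            String.ofList ('.' :: '.' :: PySem.List.slice f1 (some ((s : Int) + (l.idxOf '/' : Int))) none)
          else String.ofList f1 := by
  intro l
  induction l with
  | nil => intro s hs; simp [PySem.List.enumerate_nil, pvLoopA]
  | cons c t ih =>
    intro s hs
    rw [PySem.List.enumerate_cons]
    by_cases hc : c = '/'
    · subst hc
      simp only [List.filter_cons, beq_self_eq_true, if_pos, List.map_cons, pvLoopA]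
      rw [if_pos (by omega)]
      simp
    · have hne : (c == '/') = false := by simp [hc]
      simp only [List.filter_cons, hne, Bool.false_eq_true, if_false]
      have hIH := ih (s + 1) (by push_cast; omega)
      push_cast at hIH
      rw [hIH]
      by_cases hm : '/' ∈ t
      · have hmem : '/' ∈ c :: t := by simp [hm]
        rw [if_pos hm, if_pos hmem]
        have heq : ((s : Int) + 1) + ((t.idxOf '/' : Nat) : Int)
            = (s : Int) + (((c :: t).idxOf '/' : Nat) : Int) := by
          simp only [List.idxOf_cons, hne, cond_false]
          push_cast
          ring
        rw [heq]
      · have hmem : '/' ∉ c :: t := by simp [hm]; exact fun h => hc h.symm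
        rw [if_neg hm, if_neg hmem]

-- [a] is a prefix of l.drop j exactly when l[j] is a
theorem pv_prefix_singleton_drop (l : List Char) (a : Char) (j : Nat) :
    [a] <+: l.drop j ↔ l[j]? = some a := by
  rw [← List.head?_drop]
  constructor
  · rintro ⟨t, ht⟩
    rw [← ht]
    rfl
  · intro h
    cases hd : l.drop j with
    | nil => rw [hd] at h; simp at h
    | cons x xs =>
      rw [hd] at h
      simp at h
      exact ⟨xs, by simp [h]⟩

-- idxOf points at the FIRST occurrence
theorem pv_idxOf_min (a : Char) :
    ∀ (l : List Char) (j : Nat) (hj : j < l.length), j < l.idxOf a → l[j] ≠ a := by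
  intro l
  induction l with
  | nil => intro j hj; simp at hj
  | cons x xs ih =>
    intro j hj hlt
    rw [List.idxOf_cons] at hlt
    by_cases hx : x = a
    · simp [hx] at hlt
    · have hxa : (x == a) = false := by simp [hx]
      rw [hxa, cond_false] at hlt
      cases j with
      | zero => simpa using hx
      | succ j =>
        intro hga
        exact ih j (by simpa using hj) (by omega) (by simpa using hga)

-- PySem.Chars.find on a one-character pattern is idxOf
theorem pv_find_singleton (l : List Char) (a : Char) :
    PySem.Chars.find l [a] = if a ∈ l then (l.idxOf a : Int) else -1 := by
  by_cases h : a ∈ l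
  · rw [if_pos h]
    have hinf : [a] <:+: l := by
      obtain ⟨s, t, hst⟩ := List.append_of_mem h
      exact ⟨s, t, by simp [hst]⟩
    have hne : PySem.Chars.find l [a] ≠ -1 := (PySem.Chars.find_ne_neg_one_iff l [a]).mpr hinf
    have hpos : 0 ≤ PySem.Chars.find l [a] := by
      have := PySem.Chars.neg_one_le_find (s := l) (sub := [a]); omega
    obtain ⟨hpre, hmin⟩ := PySem.Chars.find_spec (s := l) (sub := [a]) hpos
    have hidx : l[(PySem.Chars.find l [a]).toNat]? = some a := (pv_prefix_singleton_drop l a _).mp hpre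
    have hlt : (PySem.Chars.find l [a]).toNat < l.length := by
      by_contra hge
      rw [List.getElem?_eq_none (by omega)] at hidx; simp at hidx
    have h1 : ¬ ((PySem.Chars.find l [a]).toNat < l.idxOf a) := by
      intro hlt2
      exact pv_idxOf_min a l _ hlt hlt2 (List.getElem?_eq_some_iff.mp hidx).2
    have h2 : ¬ ((l.idxOf a) < (PySem.Chars.find l [a]).toNat) := by
      intro hlt2
      apply hmin _ hlt2
      rw [pv_prefix_singleton_drop, List.getElem?_eq_some_iff]
      exact ⟨List.idxOf_lt_length_of_mem h, List.getElem_idxOf (List.idxOf_lt_length_of_mem h)⟩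
    omega
  · rw [if_neg h, PySem.Chars.find_eq_neg_one_iff]
    intro ⟨s, t, hst⟩
    exact h (by rw [← hst]; simp)

-- ===== VERDICT (by name: the statement is the Claim_ definition above) =====
theorem getNameFileReduc_spec : Claim_equal_getNameFileReduc := by
  intro f0 _
  unfold Spec_getNameFileReduc
  simp only [getNameFileReduc, getNameFileReduc_alt]
  by_cases hshort : (f0.toList.length : Int) < 23
  · rw [if_pos hshort, if_pos hshort]
  · rw [if_neg hshort, if_neg hshort]
    set f1 := PySem.Chars.replace (PySem.Chars.replace f0.toList ['\\'] ['/']) ['"'] ['/'] with hf1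
    have hlen : f1.length = f0.toList.length := by
      rw [hf1, pv_replace_single, pv_replace_single]; simp
    have hlen23 : 23 ≤ f1.length := by omega
    set k : Nat := f1.length - 22 with hkdef
    have hkle : k ≤ f1.length := by omega
    have henum : PySem.List.enumerate f1
        = PySem.List.enumerate (f1.take k) 0 ++ PySem.List.enumerate (f1.drop k) ((0 : Int) + (f1.take k).length) := by
      conv_lhs => rw [(List.take_append_drop k f1).symm]
      exact PySem.List.enumerate_append _ _ _
    have htklen : (f1.take k).length = k := by simp [List.length_take]; omega
    rw [henum, List.filter_append, List.map_append]
    rw [pvLoopA_append_fail]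
    · -- the enumeration from index k onward
      have hstart : ((0 : Int) + (f1.take k).length) = ((k : Nat) : Int) := by
        rw [htklen]; ring
      rw [hstart, pvLoopA_tail f1 k (by omega) (f1.drop k) k le_rfl]
      have hkint : (f1.length : Int) - 23 + 1 = (k : Int) := by omega
      rw [hkint, PySem.Chars.findFrom_natCast f1 ['/'] k hkle, pv_find_singleton]
      by_cases hm : '/' ∈ f1.drop k
      · rw [if_pos hm, if_pos hm]
        have hge : (0 : Int) ≤ ((f1.drop k).idxOf '/' : Int) := by positivity
        rw [if_neg (by omega : ¬ (((f1.drop k).idxOf '/' : Nat) : Int) = -1)]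
        rw [if_neg (by simp; omega : ¬ ((((k : Nat) : Int) + ((f1.drop k).idxOf '/' : Int)) == -1) = true)]
      · rw [if_neg hm, if_neg hm]
        simp
    · -- indices below k fail the length test
      intro i hi
      simp only [List.mem_map, List.mem_filter] at hi
      obtain ⟨p, ⟨hpmem, _⟩, hpi⟩ := hi
      rw [PySem.List.mem_enumerate_iff] at hpmem
      obtain ⟨j, hj, hpj⟩ := hpmem
      have : i = (j : Int) := by rw [← hpi, hpj]; simp
      subst this
      rw [htklen] at hj
      omega
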